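-- pv_equiv track=rewrite | github.com/James-HoneyBadger/Time_Warp | core/interpreter.py | _preprocess_time_warp_program
-- ===== SOURCE A (Python) =====
-- def _preprocess_time_warp_program(program_text):
--     """Preprocess Time_Warp program for unified syntax"""
--     lines = program_text.split("\n")
--     processed_lines = []
--     i = 0
--
--     while i < len(lines):
--         line = lines[i].strip()
--
--         # Strip comments from the line
--         if "REM" in line:
--             line = line.split("REM", 1)[0].strip()
--         if ";" in line and not line.upper().startswith("REPEAT"):
--             line = line.split(";", 1)[0].strip()
--
--         # Check if this is a REPEAT command with opening bracket
--         if line.upper().startswith("REPEAT ") and "[" in line and "]" not in line: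
--             # Multi-line REPEAT block
--             repeat_block = line
--             i += 1
--             bracket_depth = line.count("[") - line.count("]")
--
--             # Collect lines until brackets are balanced
--             while i < len(lines) and bracket_depth > 0:
--                 next_line = lines[i].strip()
--                 # Strip comments from next line too
--                 if "REM" in next_line:
--                     next_line = next_line.split("REM", 1)[0].strip()
--                 if ";" in next_line and not next_line.upper().startswith("REPEAT"):
--                     next_line = next_line.split(";", 1)[0].strip()
--                 if next_line and not next_line.startswith(
--                     ";"
--                 ):  # Skip empty and comment lines
--                     repeat_block += " " + next_line
--                     bracket_depth += next_line.count("[") - next_line.count("]")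
--                 i += 1
--
--             processed_lines.append(repeat_block)
--         else:
--             if line:  # Only add non-empty lines
--                 processed_lines.append(line)
--             i += 1
--
--     return "\n".join(processed_lines)
-- ===== SOURCE B (Python) =====
-- def _preprocess_time_warp_program(program_text):
--     """Preprocess Time_Warp program for unified syntax (two-pass: clean, then merge)."""
--
--     def clean(raw):
--         line = raw.strip()
--         if "REM" in line:
--             line = line.split("REM", 1)[0].strip()
--         if ";" in line and not line.upper().startswith("REPEAT"):
--             line = line.split(";", 1)[0].strip()
--         return line
--
--     def brackets(line):
--         return line.count("[") - line.count("]")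
--
--     cleaned = [clean(raw) for raw in program_text.split("\n")]
--
--     out = []
--     block = None
--     depth = 0
--     for line in cleaned:
--         if block is not None:
--             if line:
--                 block += " " + line
--                 depth += brackets(line)
--                 if depth <= 0:
--                     out.append(block)
--                     block = None
--         elif line.upper().startswith("REPEAT ") and "[" in line and "]" not in line:
--             block = line
--             depth = brackets(line)
--         elif line:
--             out.append(line)
--     if block is not None:
--         out.append(block)
--     return "\n".join(out)
-- ===== Notes on version B (the rewrite author's own statement) =====
-- stated objective: alternative
-- what changed: Replaces A's single index-driven while loop with a nested consuming while by a two-pass design: a clean() helper mapped over all lines first, then one for loop over the cleaned lines with explicit block/depth state variables and an end-of-input flush.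
import Mathlib
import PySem

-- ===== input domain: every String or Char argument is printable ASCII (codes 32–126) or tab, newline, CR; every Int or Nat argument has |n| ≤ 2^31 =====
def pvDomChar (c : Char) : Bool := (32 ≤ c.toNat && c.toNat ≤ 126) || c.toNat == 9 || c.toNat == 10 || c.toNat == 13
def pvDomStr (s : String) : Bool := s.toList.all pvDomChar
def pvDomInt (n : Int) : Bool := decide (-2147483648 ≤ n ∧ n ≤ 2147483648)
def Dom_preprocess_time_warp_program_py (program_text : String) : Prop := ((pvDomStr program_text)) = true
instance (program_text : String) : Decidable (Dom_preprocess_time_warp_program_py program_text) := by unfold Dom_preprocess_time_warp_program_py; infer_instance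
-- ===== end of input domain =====

-- B re-decomposes A's single index-driven while loop (with a nested line-consuming inner
-- loop) into two passes: a clean() helper mapped over every line first, then one for-loop
-- with explicit block/depth state and an end-of-input flush. Objective: alternative
-- decomposition, same asymptotic cost.

-- ===== PORT A =====
-- Python A's inner `while i < len(lines) and bracket_depth > 0` loop: consumes lines,
-- returns the accumulated block and the unconsumed rest.
-- `line.split(X, 1)[0]` is ported as `((PySem.Str.splitMax? line X 1).getD []).getD 0 ""`:
-- the separators "REM"/";" are nonempty and split always yields ≥ 1 piece, so neither
-- default ever fires — exact.
def pyA_inner : List String → String → Int → String × List String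
  | [], repeat_block, _ => (repeat_block, [])
  | l :: rest, repeat_block, bracket_depth =>
    if bracket_depth > 0 then
      let s0 := PySem.Str.strip l
      let s1 := if PySem.Str.isIn "REM" s0 then
          PySem.Str.strip (((PySem.Str.splitMax? s0 "REM" 1).getD []).getD 0 "") else s0
      let next_line := if PySem.Str.isIn ";" s1 && !(PySem.Str.startswith (PySem.Str.upper s1) "REPEAT") then
          PySem.Str.strip (((PySem.Str.splitMax? s1 ";" 1).getD []).getD 0 "") else s1
      if next_line != "" && !(PySem.Str.startswith next_line ";") then
        pyA_inner rest (repeat_block ++ " " ++ next_line)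
          (bracket_depth + ((PySem.Str.count next_line "[" : Int) - (PySem.Str.count next_line "]" : Int)))
      else pyA_inner rest repeat_block bracket_depth
    else (repeat_block, l :: rest)

-- Python A's outer `while i < len(lines)` loop over the raw lines. The Nat fuel is a
-- pure totality guard: every iteration consumes at least one line, so with the initial
-- fuel `lines.length` the fuel never runs out and the `0` case is unreachable.
def pyA_outerFuel : Nat → List String → List String
  | 0, _ => []
  | _ + 1, [] => []
  | f + 1, l :: rest =>
    let s0 := PySem.Str.strip l
    let s1 := if PySem.Str.isIn "REM" s0 then
        PySem.Str.strip (((PySem.Str.splitMax? s0 "REM" 1).getD []).getD 0 "") else s0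
    let line := if PySem.Str.isIn ";" s1 && !(PySem.Str.startswith (PySem.Str.upper s1) "REPEAT") then
        PySem.Str.strip (((PySem.Str.splitMax? s1 ";" 1).getD []).getD 0 "") else s1
    if PySem.Str.startswith (PySem.Str.upper line) "REPEAT " && PySem.Str.isIn "[" line && !(PySem.Str.isIn "]" line) then
      let res := pyA_inner rest line ((PySem.Str.count line "[" : Int) - (PySem.Str.count line "]" : Int))
      res.1 :: pyA_outerFuel f res.2
    else if line != "" then line :: pyA_outerFuel f rest
    else pyA_outerFuel f rest

def pyA_outer (lines : List String) : List String := pyA_outerFuel lines.length lines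

-- `program_text.split("\n")`: the separator is nonempty so split? never returns none — exact.
def preprocess_time_warp_program_py (program_text : String) : String :=
  PySem.Str.join "\n" (pyA_outer ((PySem.Str.split? program_text "\n").getD []))

-- ===== PORT B =====
-- B's `clean(raw)` helper (comment stripping; same getD note as in port A).
def pvClean (raw : String) : String :=
  let s0 := PySem.Str.strip raw
  let s1 := if PySem.Str.isIn "REM" s0 then
      PySem.Str.strip (((PySem.Str.splitMax? s0 "REM" 1).getD []).getD 0 "") else s0
  if PySem.Str.isIn ";" s1 && !(PySem.Str.startswith (PySem.Str.upper s1) "REPEAT") then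
    PySem.Str.strip (((PySem.Str.splitMax? s1 ";" 1).getD []).getD 0 "") else s1

-- B's `brackets(line)` helper.
def pvBrackets (line : String) : Int :=
  (PySem.Str.count line "[" : Int) - (PySem.Str.count line "]" : Int)

-- one step of B's for-loop: state = (out, optional (block, depth))
def pvStepB : List String × Option (String × Int) → String → List String × Option (String × Int)
  | (out, some (blk, depth)), line =>
    if line != "" then
      let blk' := blk ++ " " ++ line
      let depth' := depth + pvBrackets line
      if depth' ≤ 0 then (out ++ [blk'], none) else (out, some (blk', depth'))
    else (out, some (blk, depth))
  | (out, none), line =>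
    if PySem.Str.startswith (PySem.Str.upper line) "REPEAT " && PySem.Str.isIn "[" line && !(PySem.Str.isIn "]" line) then
      (out, some (line, pvBrackets line))
    else if line != "" then (out ++ [line], none)
    else (out, none)

def preprocess_time_warp_program_py_alt (program_text : String) : String :=
  let cleaned := ((PySem.Str.split? program_text "\n").getD []).map pvClean
  let res := cleaned.foldl pvStepB ([], none)
  PySem.Str.join "\n"
    (match res.2 with
     | some (blk, _) => res.1 ++ [blk]
     | none => res.1)

-- ===== PRECONDITION & SPEC =====
def Spec_preprocess_time_warp_program_py (program_text : String) (out : String) : Prop := out = preprocess_time_warp_program_py_alt program_text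
instance (program_text : String) (out : String) : Decidable (Spec_preprocess_time_warp_program_py program_text out) := by unfold Spec_preprocess_time_warp_program_py; infer_instance

-- ===== CLAIM (what is proved, stated in full; the proofs are below) =====
def Claim_equal_preprocess_time_warp_program_py : Prop := ∀ (program_text : String), Dom_preprocess_time_warp_program_py program_text → Spec_preprocess_time_warp_program_py program_text (preprocess_time_warp_program_py program_text)

-- ===== LEMMAS AND PROOFS =====

-- the inner loop only consumes lines
theorem pyA_inner_len_le : ∀ (lines : List String) (blk : String) (d : Int),
    (pyA_inner lines blk d).2.length ≤ lines.length := by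
  intro lines
  induction lines with
  | nil => intro blk d; simp only [pyA_inner]; simp
  | cons l rest ih =>
    intro blk d
    simp only [pyA_inner]
    split_ifs
    all_goals first
      | exact Nat.le_succ_of_le (ih _ _)
      | simp


-- flush of B's final state (proof helper)
def pvFlush : List String × Option (String × Int) → List String
  | (out, none) => out
  | (out, some (blk, _)) => out ++ [blk]

-- what A produces from a given loop state (proof helper)
def pvSpecA : Option (String × Int) → List String → List String
  | none, lines => pyA_outer lines
  | some (blk, d), lines => (pyA_inner lines blk d).1 :: pyA_outer (pyA_inner lines blk d).2

-- `s.count(c)` for a one-character needle is List.count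
theorem pv_count_go (c : Char) : ∀ (fuel : Nat) (l : List Char) (acc : Nat), l.length ≤ fuel →
    PySem.Chars.count.go [c] fuel l acc = acc + l.count c := by
  intro fuel
  induction fuel with
  | zero =>
    intro l acc h
    cases l with
    | nil => simp [PySem.Chars.count.go]
    | cons x t => simp at h
  | succ f ih =>
    intro l acc h
    cases l with
    | nil => simp [PySem.Chars.count.go]
    | cons x t =>
      rw [PySem.Chars.count.go]
      by_cases hx : c = x
      · subst hx
        simp only [List.isPrefixOf, Bool.and_true, BEq.rfl, if_pos]
        rw [show List.drop ([c] : List Char).length (c :: t) = t from rfl]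
        rw [ih t (acc+1) (by simpa using h)]
        simp
        omega
      · have hpre : List.isPrefixOf [c] (x :: t) = false := by
          simp [List.isPrefixOf]
          exact fun hxc => absurd hxc.symm (fun hh => hx hh.symm)
        rw [hpre]
        simp only [Bool.false_eq_true, if_false]
        rw [ih t acc (by simpa using h)]
        simp [List.count_cons]
        intro hxc
        exact absurd hxc.symm hx

theorem pv_count_singleton (s : String) (c : Char) :
    PySem.Str.count s (String.ofList [c]) = s.toList.count c := by
  simp only [PySem.Str.count, String.toList_ofList]
  have he : ([c] : List Char).isEmpty = false := rfl
  simp only [PySem.Chars.count, he, Bool.false_eq_true, if_false]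
  rw [pv_count_go c s.toList.length s.toList 0 le_rfl]
  omega

theorem pv_mem_of_isIn (s sub : String) (c : Char) (hsub : sub.toList = [c])
    (h : PySem.Str.isIn sub s = true) : c ∈ s.toList := by
  rw [PySem.Str.isIn_iff_infix, hsub] at h
  obtain ⟨p, q, hpq⟩ := h
  rw [← hpq]; simp

theorem pv_not_mem_of_not_isIn (s sub : String) (c : Char) (hsub : sub.toList = [c])
    (h : PySem.Str.isIn sub s = false) : c ∉ s.toList := by
  intro hc
  rw [← Bool.not_eq_true, PySem.Str.isIn_iff_infix, hsub] at h
  obtain ⟨p, q, hpq⟩ := List.append_of_mem hc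
  exact h ⟨p, q, by rw [hpq]; simp⟩

-- a REPEAT-block opener has positive bracket depth
theorem pvBrackets_pos (line : String)
    (h1 : PySem.Str.isIn "[" line = true) (h2 : PySem.Str.isIn "]" line = false) :
    0 < pvBrackets line := by
  have hm1 : '[' ∈ line.toList := pv_mem_of_isIn line "[" '[' rfl h1
  have hm2 : ']' ∉ line.toList := pv_not_mem_of_not_isIn line "]" ']' rfl h2
  have hc1 : PySem.Str.count line "[" = line.toList.count '[' := pv_count_singleton line '['
  have hc2 : PySem.Str.count line "]" = line.toList.count ']' := pv_count_singleton line ']'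
  have hp : 0 < line.toList.count '[' := List.count_pos_iff.mpr hm1
  have hz : line.toList.count ']' = 0 := List.count_eq_zero.mpr hm2
  unfold pvBrackets
  rw [hc1, hc2, hz]
  omega

-- ===== the cleaned line never starts with ';' =====
theorem pv_go_acc : ∀ (fuel m : Nat) (l cur : List Char) (A : List (List Char)) (p : List Char),
    (PySem.Chars.splitOnMax.go [';'] fuel m l cur (A ++ [p])).getD 0 [] = p := by
  intro fuel
  induction fuel with
  | zero =>
    intro m l cur A p
    rw [PySem.Chars.splitOnMax.go]
    rw [show ((cur.reverse ++ l) :: (A ++ [p])) = ((cur.reverse ++ l) :: A) ++ [p] from rfl]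
    simp
  | succ f ih =>
    intro m l cur A p
    cases l with
    | nil =>
      rw [PySem.Chars.splitOnMax.go]
      · rw [show (cur.reverse :: (A ++ [p])) = (cur.reverse :: A) ++ [p] from rfl]
        simp
      · omega
    | cons c rest =>
      rw [PySem.Chars.splitOnMax.go]
      by_cases hm : m = 0
      · rw [if_pos hm]
        rw [show ((cur.reverse ++ (c :: rest)) :: (A ++ [p])) = ((cur.reverse ++ (c :: rest)) :: A) ++ [p] from rfl]
        simp
      · rw [if_neg hm]
        by_cases hc : List.isPrefixOf [';'] (c :: rest) = true
        · rw [if_pos hc]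
          rw [show (cur.reverse :: (A ++ [p])) = (cur.reverse :: A) ++ [p] from rfl]
          exact ih _ _ _ _ p
        · rw [if_neg hc]
          exact ih _ _ _ _ p

theorem pv_go_no_semi : ∀ (fuel : Nat) (l cur : List Char), l.length < fuel → ';' ∉ cur →
    ';' ∉ (PySem.Chars.splitOnMax.go [';'] fuel 1 l cur []).getD 0 [] := by
  intro fuel
  induction fuel with
  | zero => intro l cur h; exact absurd h (Nat.not_lt_zero _)
  | succ f ih =>
    intro l cur h hcur
    cases l with
    | nil =>
      rw [PySem.Chars.splitOnMax.go]
      · simpa using fun hc => hcur hc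
      · omega
    | cons c rest =>
      rw [PySem.Chars.splitOnMax.go]
      rw [if_neg (by norm_num)]
      by_cases hc : List.isPrefixOf [';'] (c :: rest) = true
      · rw [if_pos hc]
        rw [show ((cur.reverse : List Char) :: ([] : List (List Char))) = [] ++ [cur.reverse] from rfl]
        rw [pv_go_acc]
        simpa using fun hx => hcur hx
      · rw [if_neg hc]
        apply ih rest (c :: cur) (by simpa using Nat.lt_of_succ_lt_succ h)
        intro hm
        rcases List.mem_cons.mp hm with h1 | h2
        · apply hc
          rw [← h1]
          simp [List.isPrefixOf]
        · exact hcur h2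

theorem pv_split_head_no_semi (s : String) :
    ';' ∉ (((PySem.Str.splitMax? s ";" 1).getD []).getD 0 "").toList := by
  have hsep : (";" : String).toList = [';'] := rfl
  simp only [PySem.Str.splitMax?, hsep, PySem.Chars.splitMax?]
  rw [if_neg (by simp)]
  have hdef : PySem.Chars.splitOnMax s.toList [';'] 1 =
      PySem.Chars.splitOnMax.go [';'] (s.toList.length + 1) 1 s.toList [] [] := by
    simp [PySem.Chars.splitOnMax]
  have hns := pv_go_no_semi (s.toList.length + 1) s.toList [] (by omega) (by simp)
  rw [← hdef] at hns
  cases hp : PySem.Chars.splitOnMax s.toList [';'] 1 with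
  | nil => simp
  | cons h t =>
    rw [hp] at hns
    simpa using hns

theorem pv_strip_not_mem (c : Char) (l : List Char) (h : c ∉ l) : c ∉ PySem.Chars.strip l := by
  intro hc
  apply h
  simp only [PySem.Chars.strip, PySem.Chars.rstrip, PySem.Chars.lstrip] at hc
  rw [List.mem_reverse] at hc
  have h1 := (List.dropWhile_sublist (l := (List.dropWhile PySem.Chars.isspace l).reverse) (p := PySem.Chars.isspace)).subset hc
  rw [List.mem_reverse] at h1
  exact (List.dropWhile_sublist (p := PySem.Chars.isspace)).subset h1

theorem pv_startswith_semi_false (s : String) (h : ';' ∉ s.toList) :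
    PySem.Str.startswith s ";" = false := by
  rw [Bool.eq_false_iff]
  intro hs
  rw [PySem.Str.startswith_eq, PySem.Chars.startswith_iff] at hs
  apply h
  rw [show (";" : String).toList = [';'] from rfl] at hs
  exact hs.subset (by simp)

-- a line whose upper-casing starts with "REPEAT" does not start with ';'
theorem pv_repeat_head (s : String)
    (h : PySem.Str.startswith (PySem.Str.upper s) "REPEAT" = true) :
    PySem.Str.startswith s ";" = false := by
  rw [PySem.Str.startswith_eq, PySem.Chars.startswith_iff] at h
  have hu : (PySem.Str.upper s).toList = List.map PySem.Chars.upperChar s.toList := by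
    simp [PySem.Str.upper, PySem.Chars.upper]
  rw [hu] at h
  rw [show ("REPEAT" : String).toList = ['R','E','P','E','A','T'] from rfl] at h
  rw [Bool.eq_false_iff]
  intro hs
  rw [PySem.Str.startswith_eq, PySem.Chars.startswith_iff] at hs
  rw [show (";" : String).toList = [';'] from rfl] at hs
  cases hl : s.toList with
  | nil => rw [hl] at hs; exact absurd (List.IsPrefix.length_le hs) (by simp)
  | cons c t =>
    rw [hl] at h hs
    have hc : c = ';' := (List.cons_prefix_cons.mp hs).1.symm
    have hR : PySem.Chars.upperChar c = 'R' := by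
      simp only [List.map_cons] at h
      exact (List.cons_prefix_cons.mp h).1.symm
    rw [hc] at hR
    exact absurd hR (by decide)

-- the ';'-comment-stripping step never leaves a line that starts with ';'
theorem pv_step2_no_semi (s1 : String) :
    PySem.Str.startswith
      (if PySem.Str.isIn ";" s1 && !(PySem.Str.startswith (PySem.Str.upper s1) "REPEAT") then
        PySem.Str.strip (((PySem.Str.splitMax? s1 ";" 1).getD []).getD 0 "") else s1) ";" = false := by
  by_cases hcond : (PySem.Str.isIn ";" s1 && !(PySem.Str.startswith (PySem.Str.upper s1) "REPEAT")) = true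
  · rw [if_pos hcond]
    apply pv_startswith_semi_false
    have h1 := pv_split_head_no_semi s1
    simp only [PySem.Str.strip, String.toList_ofList]
    exact pv_strip_not_mem _ _ h1
  · rw [if_neg hcond]
    by_cases hin : PySem.Str.isIn ";" s1 = true
    · have hrep : PySem.Str.startswith (PySem.Str.upper s1) "REPEAT" = true := by
        by_contra hr
        have hb : PySem.Str.startswith (PySem.Str.upper s1) "REPEAT" = false :=
          Bool.eq_false_iff.mpr hr
        exact hcond (by rw [hin, hb]; rfl)
      exact pv_repeat_head _ hrep
    · exact pv_startswith_semi_false _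
        (pv_not_mem_of_not_isIn s1 ";" ';' rfl (Bool.eq_false_iff.mpr hin))

theorem pvClean_no_semi (raw : String) :
    PySem.Str.startswith (pvClean raw) ";" = false := by
  unfold pvClean
  exact pv_step2_no_semi _

-- ===== characterizations of A's loops in terms of B's clean =====
theorem pyA_inner_cons (l : String) (rest : List String) (blk : String) (d : Int) (hd : d > 0) :
    pyA_inner (l :: rest) blk d =
      if pvClean l != "" && !(PySem.Str.startswith (pvClean l) ";") then
        pyA_inner rest (blk ++ " " ++ pvClean l) (d + pvBrackets (pvClean l))
      else pyA_inner rest blk d := by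
  rw [pyA_inner, if_pos hd]
  rfl

theorem pyA_outerFuel_cons (f : Nat) (l : String) (rest : List String) :
    pyA_outerFuel (f + 1) (l :: rest) =
      if PySem.Str.startswith (PySem.Str.upper (pvClean l)) "REPEAT " && PySem.Str.isIn "[" (pvClean l) && !(PySem.Str.isIn "]" (pvClean l)) then
        (pyA_inner rest (pvClean l) (pvBrackets (pvClean l))).1 ::
          pyA_outerFuel f (pyA_inner rest (pvClean l) (pvBrackets (pvClean l))).2
      else if pvClean l != "" then pvClean l :: pyA_outerFuel f rest
      else pyA_outerFuel f rest := by
  rw [pyA_outerFuel]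
  rfl

-- the fuel is irrelevant as long as it dominates the number of lines
theorem pyA_outerFuel_congr : ∀ (f g : Nat) (lines : List String),
    lines.length ≤ f → lines.length ≤ g → pyA_outerFuel f lines = pyA_outerFuel g lines := by
  intro f
  induction f with
  | zero =>
    intro g lines hf _
    have : lines = [] := List.eq_nil_of_length_eq_zero (Nat.le_zero.mp hf)
    subst this
    cases g <;> rfl
  | succ f' ih =>
    intro g lines hf hg
    cases lines with
    | nil => cases g <;> rfl
    | cons l rest =>
      cases g with
      | zero => simp at hg
      | succ g' =>
        rw [pyA_outerFuel_cons, pyA_outerFuel_cons]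
        have hrf : rest.length ≤ f' := by simpa using hf
        have hrg : rest.length ≤ g' := by simpa using hg
        by_cases h1 : (PySem.Str.startswith (PySem.Str.upper (pvClean l)) "REPEAT " && PySem.Str.isIn "[" (pvClean l) && !(PySem.Str.isIn "]" (pvClean l))) = true
        · rw [if_pos h1, if_pos h1]
          have hlen := pyA_inner_len_le rest (pvClean l) (pvBrackets (pvClean l))
          rw [ih g' _ (le_trans hlen hrf) (le_trans hlen hrg)]
        · rw [if_neg h1, if_neg h1]
          by_cases h2 : (pvClean l != "") = true
          · rw [if_pos h2, if_pos h2, ih g' rest hrf hrg]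
          · rw [if_neg h2, if_neg h2, ih g' rest hrf hrg]

theorem pyA_outer_nil : pyA_outer [] = [] := rfl

theorem pyA_outer_cons (l : String) (rest : List String) :
    pyA_outer (l :: rest) =
      if PySem.Str.startswith (PySem.Str.upper (pvClean l)) "REPEAT " && PySem.Str.isIn "[" (pvClean l) && !(PySem.Str.isIn "]" (pvClean l)) then
        (pyA_inner rest (pvClean l) (pvBrackets (pvClean l))).1 ::
          pyA_outer (pyA_inner rest (pvClean l) (pvBrackets (pvClean l))).2
      else if pvClean l != "" then pvClean l :: pyA_outer rest
      else pyA_outer rest := by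
  show pyA_outerFuel (rest.length + 1) (l :: rest) = _
  rw [pyA_outerFuel_cons]
  by_cases h1 : (PySem.Str.startswith (PySem.Str.upper (pvClean l)) "REPEAT " && PySem.Str.isIn "[" (pvClean l) && !(PySem.Str.isIn "]" (pvClean l))) = true
  · rw [if_pos h1, if_pos h1]
    have hlen := pyA_inner_len_le rest (pvClean l) (pvBrackets (pvClean l))
    rw [pyA_outerFuel_congr rest.length _ _ hlen le_rfl]
    rfl
  · rw [if_neg h1, if_neg h1]
    rfl

-- when the depth is no longer positive, A's inner loop stops immediately
theorem pyA_inner_nonpos (lines : List String) (blk : String) (d : Int) (hd : ¬ d > 0) :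
    pyA_inner lines blk d = (blk, lines) := by
  cases lines with
  | nil => rfl
  | cons l rest => rw [pyA_inner, if_neg hd]

-- the depth invariant of B's in-block state
def pvInv : Option (String × Int) → Prop
  | none => True
  | some (_, d) => 0 < d

theorem pv_main : ∀ (n : Nat) (lines : List String), lines.length ≤ n →
    ∀ (st : Option (String × Int)) (acc : List String), pvInv st →
    pvFlush ((lines.map pvClean).foldl pvStepB (acc, st)) = acc ++ pvSpecA st lines := by
  intro n
  induction n with
  | zero =>
    intro lines hlen st acc hst
    have hnil : lines = [] := List.eq_nil_of_length_eq_zero (Nat.le_zero.mp hlen)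
    subst hnil
    cases st with
    | none => simp [pvFlush, pvSpecA, pyA_outer_nil]
    | some p =>
      obtain ⟨b, d⟩ := p
      simp [pvFlush, pvSpecA, pyA_inner, pyA_outer_nil]
  | succ k ih =>
    intro lines hlen st acc hst
    cases lines with
    | nil =>
      cases st with
      | none => simp [pvFlush, pvSpecA, pyA_outer_nil]
      | some p =>
        obtain ⟨b, d⟩ := p
        simp [pvFlush, pvSpecA, pyA_inner, pyA_outer_nil]
    | cons l rest =>
      have hr : rest.length ≤ k := by simpa using hlen
      simp only [List.map_cons, List.foldl_cons]
      cases st with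
      | none =>
        simp only [pvStepB, pvSpecA]
        rw [pyA_outer_cons]
        by_cases hrep : (PySem.Str.startswith (PySem.Str.upper (pvClean l)) "REPEAT " && PySem.Str.isIn "[" (pvClean l) && !(PySem.Str.isIn "]" (pvClean l))) = true
        · rw [if_pos hrep, if_pos hrep]
          have hd : 0 < pvBrackets (pvClean l) := by
            have hrep' := hrep
            simp only [Bool.and_eq_true, Bool.not_eq_eq_eq_not, Bool.not_true] at hrep'
            exact pvBrackets_pos _ hrep'.1.2 hrep'.2
          refine (ih rest hr (some (pvClean l, pvBrackets (pvClean l))) acc hd).trans ?_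
          simp only [pvSpecA]
        · rw [if_neg hrep, if_neg hrep]
          by_cases hne : (pvClean l != "") = true
          · rw [if_pos hne, if_pos hne]
            refine (ih rest hr none (acc ++ [pvClean l]) trivial).trans ?_
            simp [pvSpecA]
          · rw [if_neg hne, if_neg hne]
            exact ih rest hr none acc trivial
      | some p =>
        obtain ⟨blk, d⟩ := p
        have hd : 0 < d := hst
        simp only [pvStepB, pvSpecA]
        have hin := pyA_inner_cons l rest blk d hd
        rw [pvClean_no_semi l] at hin
        simp only [Bool.not_false, Bool.and_true] at hin
        by_cases hne : (pvClean l != "") = true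
        · rw [if_pos hne]
          rw [if_pos hne] at hin
          by_cases hdp : d + pvBrackets (pvClean l) ≤ 0
          · rw [if_pos hdp]
            refine (ih rest hr none (acc ++ [blk ++ " " ++ pvClean l]) trivial).trans ?_
            rw [hin, pyA_inner_nonpos rest _ _ (by omega)]
            simp [pvSpecA]
          · rw [if_neg hdp]
            refine (ih rest hr (some (blk ++ " " ++ pvClean l, d + pvBrackets (pvClean l))) acc (show 0 < d + pvBrackets (pvClean l) by omega)).trans ?_
            simp [pvSpecA, hin]
        · rw [if_neg hne]
          rw [if_neg hne] at hin
          refine (ih rest hr (some (blk, d)) acc hd).trans ?_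
          simp [pvSpecA, hin]

-- ===== VERDICT (by name: the statement is the Claim_ definition above) =====
theorem preprocess_time_warp_program_py_spec : Claim_equal_preprocess_time_warp_program_py := by
  intro program_text _
  unfold Spec_preprocess_time_warp_program_py preprocess_time_warp_program_py preprocess_time_warp_program_py_alt
  dsimp only
  have h := pv_main (((PySem.Str.split? program_text "\n").getD []).length)
      ((PySem.Str.split? program_text "\n").getD []) le_rfl none [] trivial
  simp only [pvSpecA, List.nil_append] at h
  rcases hfold : List.foldl pvStepB ([], none)
      (List.map pvClean ((PySem.Str.split? program_text "\n").getD [])) with ⟨o, b⟩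
  rw [hfold] at h
  cases b with
  | none =>
    simp only [pvFlush] at h
    rw [← h]
  | some p =>
    obtain ⟨bb, dd⟩ := p
    simp only [pvFlush] at h
    rw [← h]
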